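-- pv_equiv track=rewrite | github.com/vmware/photon | support/package-builder/PackageBuildDataGenerator.py | _buildDependentPackages
-- ===== SOURCE A (Python) =====
-- import copy
--
-- def _buildDependentPackages(dependencyGraph, package):
--     dependentPackages = {}
--     if package is None:
--         dependentPackages = copy.deepcopy(dependencyGraph)
--     else:
--         depPkgs = set()
--         depPkgs.add(package)
--         while depPkgs:
--             pkg = depPkgs.pop()
--             if pkg in dependentPackages:
--                 continue
--             dependentPackages[pkg] = copy.copy(dependencyGraph[pkg])
--             for depPkg in dependencyGraph[pkg]:
--                 depPkgs.add(depPkg)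
--     return dependentPackages
-- ===== SOURCE B (Python) =====
-- import copy
--
--
-- def _buildDependentPackages(dependencyGraph, package):
--     if package is None:
--         return copy.deepcopy(dependencyGraph)
--     dependentPackages = {package: copy.copy(dependencyGraph[package])}
--     changed = True
--     while changed:
--         changed = False
--         for pkg in list(dependentPackages):
--             for depPkg in dependencyGraph[pkg]:
--                 if depPkg not in dependentPackages:
--                     dependentPackages[depPkg] = copy.copy(dependencyGraph[depPkg])
--                     changed = True
--     return dependentPackages
-- ===== Notes on version B (the rewrite author's own statement) =====
-- stated objective: alternative
-- what changed: A drains a worklist set (pop a package, skip if collected, push its dependencies); B keeps no worklist at all and computes the result as a fixpoint: repeated full passes over the already-collected packages that add every missing dependency, until a pass changes nothing.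
import Mathlib
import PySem

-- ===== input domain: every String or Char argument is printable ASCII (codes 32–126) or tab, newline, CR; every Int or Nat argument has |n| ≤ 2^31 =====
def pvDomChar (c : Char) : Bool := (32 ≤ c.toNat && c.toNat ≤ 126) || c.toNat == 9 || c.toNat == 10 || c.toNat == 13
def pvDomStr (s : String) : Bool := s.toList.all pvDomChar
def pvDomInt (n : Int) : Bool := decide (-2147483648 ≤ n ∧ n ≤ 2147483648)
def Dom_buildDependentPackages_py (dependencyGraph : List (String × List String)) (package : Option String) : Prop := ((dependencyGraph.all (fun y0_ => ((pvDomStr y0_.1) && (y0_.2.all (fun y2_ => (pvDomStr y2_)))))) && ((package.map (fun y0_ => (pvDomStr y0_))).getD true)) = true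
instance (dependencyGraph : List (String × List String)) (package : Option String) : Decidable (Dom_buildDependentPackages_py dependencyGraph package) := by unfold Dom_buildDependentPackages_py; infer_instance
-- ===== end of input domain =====

-- B replaces A's worklist set by a fixpoint computation: repeated full passes over the
-- already-collected packages, adding each missing dependency, until a pass changes nothing
-- (objective: alternative; no worklist at all; B may rescan, so it is not claimed faster).
-- The equivalence is about the RETURN value (neither version mutates its arguments).
-- Python's set.pop order is hash-dependent and the returned dict is compared as a dict
-- (order ignored); the port of A fixes the deterministic choice "pop the first-inserted
-- element" for the worklist set.

-- ===== PORT A =====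
-- finite universe of all names occurring in the graph (used only for termination measures)
def pvU (g : List (String × List String)) : Finset String :=
  (g.map Prod.fst ++ g.flatMap Prod.snd).toFinset

-- termination helpers for the loops of both ports (cited by decreasing_by)
lemma pvGetD_mem_U (g : List (String × List String)) (k : String) :
    ∀ n ∈ (PySem.Dict.mk g).getD k [], n ∈ pvU g := by
  intro n hn
  refine List.mem_toFinset.2 (List.mem_append.2 (Or.inr ?_))
  cases hv : (PySem.Dict.mk g).get? k with
  | none => rw [PySem.Dict.getD_of_get?_eq_none _ _ hv] at hn; simp at hn
  | some v =>
      rw [PySem.Dict.getD_of_get?_eq_some _ _ hv] at hn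
      exact List.mem_flatMap.2 ⟨(k, v), PySem.Dict.mem_items_of_get?_eq_some _ hv, hn⟩

lemma pvGetD_of_not_mem (g : List (String × List String)) (k : String)
    (h : k ∉ g.map Prod.fst) : (PySem.Dict.mk g).getD k [] = [] := by
  apply PySem.Dict.getD_of_not_contains
  rw [PySem.Dict.contains_eq_decide_mem_keys]
  simpa [PySem.Dict.keys] using h

lemma pvCard_lt (U : Finset String) (d : PySem.Dict String (List String))
    (x : String) (v : List String) (hx : x ∈ U) (hnx : d.contains x = false) :
    (U \ (d.insert x v).keys.toFinset).card < (U \ d.keys.toFinset).card := by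
  have hxk : x ∉ d.keys := by
    intro hm
    rw [(PySem.Dict.contains_iff_mem_keys d x).2 hm] at hnx
    cases hnx
  apply Finset.card_lt_card
  constructor
  · intro y hy
    simp only [Finset.mem_sdiff, List.mem_toFinset] at hy ⊢
    exact ⟨hy.1, fun hm => hy.2 ((PySem.Dict.mem_keys_insert d x y v).2 (Or.inr hm))⟩
  · intro hsub
    have hx1 : x ∈ U \ d.keys.toFinset := by
      simp only [Finset.mem_sdiff, List.mem_toFinset]; exact ⟨hx, hxk⟩
    have hx2 := hsub hx1
    simp only [Finset.mem_sdiff, List.mem_toFinset] at hx2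
    exact hx2.2 ((PySem.Dict.mem_keys_insert d x x v).2 (Or.inl rfl))

lemma pvCard_eq_of_not_mem_U (U : Finset String) (d : PySem.Dict String (List String))
    (x : String) (v : List String) (hx : x ∉ U) :
    (U \ (d.insert x v).keys.toFinset).card = (U \ d.keys.toFinset).card := by
  congr 1
  ext y
  simp only [Finset.mem_sdiff, List.mem_toFinset, PySem.Dict.mem_keys_insert]
  constructor
  · rintro ⟨h1, h2⟩; exact ⟨h1, fun hm => h2 (Or.inr hm)⟩
  · rintro ⟨h1, h2⟩
    refine ⟨h1, ?_⟩
    rintro (rfl | hm)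
    · exact hx h1
    · exact h2 hm

-- A's while loop: pop a package from the worklist set, skip it if already collected,
-- otherwise record its adjacency list and add all its dependencies to the worklist.
def pvALoop (g : List (String × List String))
    (visited : PySem.Dict String (List String)) (depPkgs : PySem.Set String) :
    PySem.Dict String (List String) :=
  match depPkgs with
  | [] => visited
  | pkg :: rest =>
    if visited.contains pkg then
      pvALoop g visited rest
    else
      -- dependencyGraph[pkg] raises KeyError when pkg is missing — excluded by Pre_; getD [] here
      pvALoop g (visited.insert pkg ((PySem.Dict.mk g).getD pkg []))
        (((PySem.Dict.mk g).getD pkg []).foldl PySem.Set.add rest)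
termination_by ((pvU g \ visited.keys.toFinset).card, depPkgs.length)
decreasing_by
  · exact Prod.Lex.right _ (Nat.lt_succ_self _)
  · rename_i hc
    by_cases hU : pkg ∈ pvU g
    · exact Prod.Lex.left _ _ (pvCard_lt (pvU g) visited pkg _ hU (Bool.not_eq_true _ ▸ hc))
    · have hadj : (PySem.Dict.mk g).getD pkg [] = [] := by
        apply pvGetD_of_not_mem
        intro hm
        exact hU (List.mem_toFinset.2 (List.mem_append.2 (Or.inl hm)))
      rw [pvCard_eq_of_not_mem_U (pvU g) visited pkg _ hU, hadj]
      exact Prod.Lex.right _ (Nat.lt_succ_self _)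

def buildDependentPackages_py (dependencyGraph : List (String × List String))
    (package : Option String) : List (String × List String) :=
  match package with
  | none => dependencyGraph          -- copy.deepcopy: a value-equal copy
  | some p => (pvALoop dependencyGraph PySem.Dict.empty
      (PySem.Set.add PySem.Set.empty p)).items

-- ===== PORT B =====
-- B's innermost step: a dependency not yet collected is recorded and the change flag is set
def pvPassStep (g : List (String × List String))
    (st : PySem.Dict String (List String) × Bool) (dep : String) :
    PySem.Dict String (List String) × Bool :=
  if st.1.contains dep then st
  else (st.1.insert dep ((PySem.Dict.mk g).getD dep []), true)

-- B's inner for loop over the dependencies of one collected package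
def pvPass (g : List (String × List String))
    (st : PySem.Dict String (List String) × Bool) (pkg : String) :
    PySem.Dict String (List String) × Bool :=
  ((PySem.Dict.mk g).getD pkg []).foldl (pvPassStep g) st

-- termination helpers for B's fixpoint loop (cited by decreasing_by)
lemma pvPassStep_measure (g : List (String × List String)) (adj : List String) :
    ∀ (st : PySem.Dict String (List String) × Bool),
      (∀ n ∈ adj, n ∈ pvU g) →
      (adj.foldl (pvPassStep g) st = st ∨
        (pvU g \ (adj.foldl (pvPassStep g) st).1.keys.toFinset).card <
          (pvU g \ st.1.keys.toFinset).card) := by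
  induction adj with
  | nil => intro st _; exact Or.inl rfl
  | cons n adj ih =>
      intro st hadj
      by_cases hc : st.1.contains n
      · have : pvPassStep g st n = st := by simp [pvPassStep, hc]
        simpa [this] using ih st (fun m hm => hadj m (List.mem_cons_of_mem _ hm))
      · have hn : (pvU g \ ((pvPassStep g st n).1.keys.toFinset)).card <
            (pvU g \ st.1.keys.toFinset).card := by
          simp only [pvPassStep, hc]
          exact pvCard_lt (pvU g) st.1 n _ (hadj n (List.mem_cons_self ..))
            (Bool.not_eq_true _ ▸ hc)
        right
        simp only [List.foldl_cons]
        rcases ih (pvPassStep g st n) (fun m hm => hadj m (List.mem_cons_of_mem _ hm)) with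
          heq | hlt
        · rw [heq]; exact hn
        · exact lt_trans hlt hn

lemma pvPass_measure (g : List (String × List String)) (l : List String) :
    ∀ (st : PySem.Dict String (List String) × Bool),
      (l.foldl (pvPass g) st = st ∨
        (pvU g \ (l.foldl (pvPass g) st).1.keys.toFinset).card <
          (pvU g \ st.1.keys.toFinset).card) := by
  induction l with
  | nil => intro st; exact Or.inl rfl
  | cons pkg l ih =>
      intro st
      simp only [List.foldl_cons]
      rcases pvPassStep_measure g ((PySem.Dict.mk g).getD pkg []) st
          (pvGetD_mem_U g pkg) with heq | hlt
      · rw [show pvPass g st pkg = st from heq]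
        exact ih st
      · rcases ih (pvPass g st pkg) with heq' | hlt'
        · rw [heq']; exact Or.inr hlt
        · exact Or.inr (lt_trans hlt' hlt)

-- B's while loop: one full pass over the collected packages; repeat while something changed
def pvBFix (g : List (String × List String)) (d : PySem.Dict String (List String)) :
    PySem.Dict String (List String) :=
  let st := d.keys.foldl (pvPass g) (d, false)
  if h : st.2 = true then pvBFix g st.1 else st.1
termination_by (pvU g \ d.keys.toFinset).card
decreasing_by
  rcases pvPass_measure g d.keys (d, false) with heq | hlt
  · have h' : (d.keys.foldl (pvPass g) (d, false)).2 = true := h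
    rw [heq] at h'
    cases h'
  · exact hlt

def buildDependentPackages_py_alt (dependencyGraph : List (String × List String))
    (package : Option String) : List (String × List String) :=
  match package with
  | none => dependencyGraph          -- copy.deepcopy: a value-equal copy
  | some p =>
      -- dependencyGraph[package] raises KeyError when missing — excluded by Pre_; getD [] here
      (pvBFix dependencyGraph
        (PySem.Dict.empty.insert p ((PySem.Dict.mk dependencyGraph).getD p []))).items

-- ===== PRECONDITION & SPEC =====
-- standard one-step expansion of a set of names by the graph's edges (used only to STATE
-- where A raises KeyError; neither port computes this set)
def pvReachStep (g : List (String × List String)) (s : List String) : List String :=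
  g.foldl (fun acc kv => if kv.1 ∈ s then kv.2.foldl PySem.Set.add acc else acc) s

-- the names reachable from p (iterating g.length times reaches the transitive closure,
-- since a shortest path passes through distinct keys of g)
def pvReach (g : List (String × List String)) (p : String) : List String :=
  (pvReachStep g)^[g.length] [p]

-- Pre_ excludes (a) association lists with duplicate keys, which do not arise from a Python
-- dict (dict construction keeps only the last binding while the port's lookup is first-match),
-- and (b) inputs on which A raises KeyError: a start package, or a dependency REACHABLE from
-- it, that is not a key of the graph. Dangling names that are unreachable from the start
-- package stay inside Pre_ (A returns normally there).
def Pre_buildDependentPackages_py (dependencyGraph : List (String × List String))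
    (package : Option String) : Prop :=
  (dependencyGraph.map Prod.fst).Nodup ∧
  package.all (fun p =>
    (pvReach dependencyGraph p).all
      (fun x => decide (x ∈ dependencyGraph.map Prod.fst))) = true

instance (dependencyGraph : List (String × List String)) (package : Option String) :
    Decidable (Pre_buildDependentPackages_py dependencyGraph package) := by
  unfold Pre_buildDependentPackages_py; infer_instance

def pvWitness_buildDependentPackages_py : (List (String × List String)) × Option String :=
  ([("a", ["b"]), ("b", [])], some "a")

def Spec_buildDependentPackages_py (dependencyGraph : List (String × List String))
    (package : Option String) (out : List (String × List String)) : Prop :=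
  out = buildDependentPackages_py_alt dependencyGraph package

instance (dependencyGraph : List (String × List String)) (package : Option String)
    (out : List (String × List String)) :
    Decidable (Spec_buildDependentPackages_py dependencyGraph package out) := by
  unfold Spec_buildDependentPackages_py; infer_instance

-- ===== CLAIM (what is proved, stated in full; the proofs are below) =====
def Claim_equal_buildDependentPackages_py : Prop :=
  ∀ (dependencyGraph : List (String × List String)) (package : Option String),
    Dom_buildDependentPackages_py dependencyGraph package →
    Pre_buildDependentPackages_py dependencyGraph package →
    Spec_buildDependentPackages_py dependencyGraph package
      (buildDependentPackages_py dependencyGraph package)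

-- ===== LEMMAS AND PROOFS =====
-- the entry recorded for a collected package: its (copied) adjacency list from the graph
def pvPair (g : List (String × List String)) (n : String) : String × List String :=
  (n, (PySem.Dict.mk g).getD n [])

lemma pvKeys_of_items (d : PySem.Dict String (List String)) (g : List (String × List String))
    (o : List String) (h : d.items = o.map (pvPair g)) : d.keys = o := by
  have : d.keys = d.items.map Prod.fst := rfl
  rw [this, h, List.map_map]
  simp [pvPair, Function.comp_def]

-- PROOF-LAYER intermediate (not a port): BFS that scans a growing discovery list by index,
-- recording each dependency when first seen; A's loop and B's fixpoint are both equal to it.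
def pvBStep (g : List (String × List String))
    (st : PySem.Dict String (List String) × List String) (depPkg : String) :
    PySem.Dict String (List String) × List String :=
  if st.1.contains depPkg then st
  else (st.1.insert depPkg ((PySem.Dict.mk g).getD depPkg []), st.2 ++ [depPkg])

lemma pvBFold_measure (g : List (String × List String)) (adj : List String) :
    ∀ (st : PySem.Dict String (List String) × List String),
      (∀ n ∈ adj, n ∈ pvU g) →
      (adj.foldl (pvBStep g) st = st ∨
        (pvU g \ (adj.foldl (pvBStep g) st).1.keys.toFinset).card <
          (pvU g \ st.1.keys.toFinset).card) := by
  induction adj with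
  | nil => intro st _; exact Or.inl rfl
  | cons n adj ih =>
      intro st hadj
      by_cases hc : st.1.contains n
      · have : pvBStep g st n = st := by simp [pvBStep, hc]
        simpa [this] using ih st (fun m hm => hadj m (List.mem_cons_of_mem _ hm))
      · have hn : (pvU g \ ((pvBStep g st n).1.keys.toFinset)).card <
            (pvU g \ st.1.keys.toFinset).card := by
          simp only [pvBStep, hc]
          exact pvCard_lt (pvU g) st.1 n _ (hadj n (List.mem_cons_self ..))
            (Bool.not_eq_true _ ▸ hc)
        right
        simp only [List.foldl_cons]
        rcases ih (pvBStep g st n) (fun m hm => hadj m (List.mem_cons_of_mem _ hm)) with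
          heq | hlt
        · rw [heq]; exact hn
        · exact lt_trans hlt hn

def pvBLoop (g : List (String × List String))
    (result : PySem.Dict String (List String)) (order : List String) (i : Nat) :
    PySem.Dict String (List String) :=
  if h : i < order.length then
    let st := ((PySem.Dict.mk g).getD order[i] []).foldl (pvBStep g) (result, order)
    pvBLoop g st.1 st.2 (i + 1)
  else result
termination_by ((pvU g \ result.keys.toFinset).card, order.length - i)
decreasing_by
  rcases pvBFold_measure g ((PySem.Dict.mk g).getD order[i] []) (result, order)
      (pvGetD_mem_U g order[i]) with heq | hlt
  · rw [heq]
    exact Prod.Lex.right _ (by show order.length - (i + 1) < order.length - i; omega)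
  · exact Prod.Lex.left _ _ hlt

-- the inner loop, simulated: A adds pkg's dependencies to the worklist one by one while the
-- BFS records the unseen ones; the worklist stays the not-yet-collected tail of the list
lemma pvFoldSim (g : List (String × List String)) (i : Nat) (adj : List String) :
    ∀ (q : List String) (r : PySem.Dict String (List String)) (o : List String),
      q.Nodup → o.Nodup → (∀ x ∈ q, x ∈ o) →
      q.filter (fun x => decide (x ∉ o.take (i + 1))) = o.drop (i + 1) →
      i + 1 ≤ o.length →
      r.items = o.map (pvPair g) →
      (∃ ext : List String, (adj.foldl (pvBStep g) (r, o)).2 = o ++ ext) ∧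
      (adj.foldl (pvBStep g) (r, o)).1.items =
        (adj.foldl (pvBStep g) (r, o)).2.map (pvPair g) ∧
      (adj.foldl PySem.Set.add q).Nodup ∧
      (adj.foldl (pvBStep g) (r, o)).2.Nodup ∧
      (∀ x ∈ adj.foldl PySem.Set.add q, x ∈ (adj.foldl (pvBStep g) (r, o)).2) ∧
      (adj.foldl PySem.Set.add q).filter
          (fun x => decide (x ∉ (adj.foldl (pvBStep g) (r, o)).2.take (i + 1))) =
        (adj.foldl (pvBStep g) (r, o)).2.drop (i + 1) := by
  induction adj with
  | nil =>
      intro q r o hq ho hsub hfil hi hr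
      simp only [List.foldl_nil]
      exact ⟨⟨[], by simp⟩, hr, hq, ho, hsub, hfil⟩
  | cons n adj ih =>
      intro q r o hq ho hsub hfil hi hr
      have hkeys : r.keys = o := pvKeys_of_items r g o hr
      have hcon : r.contains n = decide (n ∈ o) := by
        rw [PySem.Dict.contains_eq_decide_mem_keys, hkeys]
      simp only [List.foldl_cons]
      by_cases hqn : n ∈ q
      · have hno : n ∈ o := hsub n hqn
        rw [PySem.Set.add_of_mem hqn]
        have hst : pvBStep g (r, o) n = (r, o) := by simp [pvBStep, hcon, hno]
        simp only [hst]
        exact ih q r o hq ho hsub hfil hi hr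
      · rw [PySem.Set.add_of_not_mem hqn]
        by_cases hon : n ∈ o
        · have hst : pvBStep g (r, o) n = (r, o) := by simp [pvBStep, hcon, hon]
          simp only [hst]
          have hnt : n ∈ o.take (i + 1) := by
            rcases (List.mem_append.1 (by rw [List.take_append_drop (i+1) o]; exact hon :
                n ∈ o.take (i+1) ++ o.drop (i+1))) with h | h
            · exact h
            · exact absurd (List.mem_filter.1 (hfil ▸ h)).1 hqn
          apply ih (q ++ [n]) r o ?_ ho ?_ ?_ hi hr
          · exact hq.append (List.nodup_singleton n)
              (fun a ha hb => hqn ((List.mem_singleton.1 hb) ▸ ha))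
          · intro x hx
            rcases List.mem_append.1 hx with h | h
            · exact hsub x h
            · simpa using (List.mem_singleton.1 h) ▸ hon
          · rw [List.filter_append, ← hfil]
            have hz : List.filter (fun x => decide (x ∉ o.take (i + 1))) [n] = [] := by
              simp [hnt]
            rw [hz, List.append_nil]
        · have hcf : r.contains n = false := by rw [hcon]; simp [hon]
          have hst : pvBStep g (r, o) n =
              (r.insert n ((PySem.Dict.mk g).getD n []), o ++ [n]) := by
            simp [pvBStep, hcf]
          simp only [hst]
          have hr' : (r.insert n ((PySem.Dict.mk g).getD n [])).items =
              (o ++ [n]).map (pvPair g) := by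
            rw [PySem.Dict.items_insert_of_not_contains _ _ hcf, hr]
            simp [pvPair]
          have htk : (o ++ [n]).take (i + 1) = o.take (i + 1) :=
            List.take_append_of_le_length hi
          obtain ⟨⟨ext, hext⟩, h2, h3, h4, h5, h6⟩ :=
            ih (q ++ [n]) (r.insert n ((PySem.Dict.mk g).getD n [])) (o ++ [n])
              (hq.append (List.nodup_singleton n)
                (fun a ha hb => hqn ((List.mem_singleton.1 hb) ▸ ha)))
              (ho.append (List.nodup_singleton n)
                (fun a ha hb => hon ((List.mem_singleton.1 hb) ▸ ha)))
              (by intro x hx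
                  rcases List.mem_append.1 hx with h | h
                  · exact List.mem_append.2 (Or.inl (hsub x h))
                  · exact List.mem_append.2 (Or.inr h))
              (by have hnn : n ∉ o.take (i + 1) := fun hm => hon (List.take_subset _ _ hm)
                  rw [htk, List.filter_append, List.drop_append_of_le_length hi, ← hfil]
                  simp [hnn])
              (by simp; omega)
              hr'
          exact ⟨⟨[n] ++ ext, by rw [hext, List.append_assoc]⟩, h2, h3, h4, h5, h6⟩

-- A's loop equals the index BFS
lemma pvMain (g : List (String × List String)) (visited : PySem.Dict String (List String))
    (q : PySem.Set String) :
    ∀ (r : PySem.Dict String (List String)) (o : List String) (i : Nat),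
      visited.items = (o.take i).map (pvPair g) →
      r.items = o.map (pvPair g) →
      q.Nodup → o.Nodup → (∀ x ∈ q, x ∈ o) →
      q.filter (fun x => decide (x ∉ o.take i)) = o.drop i →
      pvALoop g visited q = pvBLoop g r o i := by
  fun_induction pvALoop g visited q with
  | case1 visited =>
      intro r o i h1 hr hq ho hsub hfil
      have hlen : o.length ≤ i := by
        rw [← List.drop_eq_nil_iff, ← hfil]
        simp
      rw [pvBLoop, dif_neg (by omega)]
      apply PySem.Dict.ext
      rw [h1, hr, List.take_of_length_le hlen]
  | case2 visited pkg rest hc ih =>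
      intro r o i h1 hr hq ho hsub hfil
      have hkeys : visited.keys = o.take i := pvKeys_of_items visited g _ h1
      have hpk : pkg ∈ o.take i := by
        have := (PySem.Dict.contains_iff_mem_keys visited pkg).1 hc
        rwa [hkeys] at this
      apply ih r o i h1 hr (List.Nodup.of_cons hq) ho
        (fun x hx => hsub x (List.mem_cons_of_mem _ hx))
      rw [← hfil]
      simp [hpk]
  | case3 visited pkg rest hc ih =>
      intro r o i h1 hr hq ho hsub hfil
      have hcf : visited.contains pkg = false := by
        cases h : visited.contains pkg
        · rfl
        · exact absurd h hc
      have hkeys : visited.keys = o.take i := pvKeys_of_items visited g _ h1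
      have hpk : pkg ∉ o.take i := by
        intro hm
        rw [(PySem.Dict.contains_iff_mem_keys visited pkg).2 (by rw [hkeys]; exact hm)] at hcf
        cases hcf
      have hfil2 : o.drop i = pkg :: rest.filter (fun x => decide (x ∉ o.take i)) := by
        rw [← hfil]
        simp [hpk]
      have hi : i < o.length := by
        by_contra hcon
        rw [List.drop_eq_nil_of_le (by omega)] at hfil2
        cases hfil2
      have hd : o.drop i = o[i] :: o.drop (i + 1) := (List.getElem_cons_drop hi).symm
      rw [hd] at hfil2
      obtain ⟨hoi, hrest⟩ : o[i] = pkg ∧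
          rest.filter (fun x => decide (x ∉ o.take i)) = o.drop (i + 1) := by
        injection hfil2 with e1 e2
        exact ⟨e1, e2.symm⟩
      have ht : o.take (i + 1) = o.take i ++ [pkg] := by
        rw [List.take_add_one, List.getElem?_eq_getElem hi, hoi]
        rfl
      have hpr : pkg ∉ rest := (List.nodup_cons.1 hq).1
      have hfil3 : rest.filter (fun x => decide (x ∉ o.take (i + 1))) = o.drop (i + 1) := by
        rw [← hrest]
        apply List.filter_congr
        intro x hx
        have hxp : x ≠ pkg := fun h => hpr (h ▸ hx)
        simp [ht, hxp]
      obtain ⟨⟨ext, hext⟩, hr', hq', ho', hsub', hfil'⟩ :=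
        pvFoldSim g i ((PySem.Dict.mk g).getD pkg []) rest r o
          (List.Nodup.of_cons hq) ho
          (fun x hx => hsub x (List.mem_cons_of_mem _ hx)) hfil3 hi hr
      have h1' : (visited.insert pkg ((PySem.Dict.mk g).getD pkg [])).items =
          ((((PySem.Dict.mk g).getD pkg []).foldl (pvBStep g) (r, o)).2.take (i + 1)).map
            (pvPair g) := by
        rw [PySem.Dict.items_insert_of_not_contains _ _ hcf, h1, hext,
          List.take_append_of_le_length hi, ht]
        simp [pvPair]
      rw [pvBLoop, dif_pos hi]
      have hgx : ((PySem.Dict.mk g).getD o[i] []) = ((PySem.Dict.mk g).getD pkg []) := by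
        rw [hoi]
      simp only [hgx]
      exact ih _ _ (i + 1) h1' hr' hq' ho' hsub' hfil'

-- ===== bridge: the index BFS equals B's fixpoint loop =====
def pvSeg (g : List (String × List String))
    (st : PySem.Dict String (List String) × List String) (pkg : String) :
    PySem.Dict String (List String) × List String :=
  ((PySem.Dict.mk g).getD pkg []).foldl (pvBStep g) st

lemma pvBStep_fold_prefix (g : List (String × List String)) (adj : List String) :
    ∀ st : PySem.Dict String (List String) × List String,
      ∃ ext, (adj.foldl (pvBStep g) st).2 = st.2 ++ ext := by
  induction adj with
  | nil => intro st; exact ⟨[], by simp⟩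
  | cons n adj ih =>
      intro st
      simp only [List.foldl_cons]
      obtain ⟨ext, hext⟩ := ih (pvBStep g st n)
      by_cases hc : st.1.contains n
      · exact ⟨ext, by rw [hext]; simp [pvBStep, hc]⟩
      · exact ⟨[n] ++ ext, by rw [hext]; simp [pvBStep, hc]⟩

lemma pvSeg_fold_prefix (g : List (String × List String)) (l : List String) :
    ∀ st : PySem.Dict String (List String) × List String,
      ∃ ext, (l.foldl (pvSeg g) st).2 = st.2 ++ ext := by
  induction l with
  | nil => intro st; exact ⟨[], by simp⟩
  | cons pkg l ih =>
      intro st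
      simp only [List.foldl_cons]
      obtain ⟨e2, h2⟩ := ih (pvSeg g st pkg)
      obtain ⟨e1, h1⟩ := pvBStep_fold_prefix g ((PySem.Dict.mk g).getD pkg []) st
      exact ⟨e1 ++ e2, by rw [h2, show (pvSeg g st pkg).2 = st.2 ++ e1 from h1,
        List.append_assoc]⟩

lemma pvBStep_fold_items (g : List (String × List String)) (adj : List String) :
    ∀ (r : PySem.Dict String (List String)) (o : List String),
      r.items = o.map (pvPair g) →
      (adj.foldl (pvBStep g) (r, o)).1.items = (adj.foldl (pvBStep g) (r, o)).2.map (pvPair g) := by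
  induction adj with
  | nil => intro r o h; simpa using h
  | cons n adj ih =>
      intro r o h
      have hcon : r.contains n = decide (n ∈ o) := by
        rw [PySem.Dict.contains_eq_decide_mem_keys, pvKeys_of_items r g o h]
      simp only [List.foldl_cons]
      by_cases hno : n ∈ o
      · have hst : pvBStep g (r, o) n = (r, o) := by simp [pvBStep, hcon, hno]
        rw [hst]; exact ih r o h
      · have hcf : r.contains n = false := by rw [hcon]; simp [hno]
        have hst : pvBStep g (r, o) n =
            (r.insert n ((PySem.Dict.mk g).getD n []), o ++ [n]) := by
          simp [pvBStep, hcf]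
        rw [hst]
        apply ih
        rw [PySem.Dict.items_insert_of_not_contains _ _ hcf, h]
        simp [pvPair]

lemma pvSeg_fold_items (g : List (String × List String)) (l : List String) :
    ∀ (r : PySem.Dict String (List String)) (o : List String),
      r.items = o.map (pvPair g) →
      (l.foldl (pvSeg g) (r, o)).1.items = (l.foldl (pvSeg g) (r, o)).2.map (pvPair g) := by
  induction l with
  | nil => intro r o h; simpa using h
  | cons pkg l ih =>
      intro r o h
      simp only [List.foldl_cons]
      rcases hst : pvSeg g (r, o) pkg with ⟨r', o'⟩
      have h' := pvBStep_fold_items g ((PySem.Dict.mk g).getD pkg []) r o h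
      rw [show ((PySem.Dict.mk g).getD pkg []).foldl (pvBStep g) (r, o) = (r', o') from hst]
        at h'
      exact ih r' o' h'

-- one pvPassStep fold mirrors one pvBStep fold: same dictionary; flag = "the order list grew"
lemma pvC1 (g : List (String × List String)) (adj : List String) :
    ∀ (d : PySem.Dict String (List String)) (o : List String) (flag : Bool),
      adj.foldl (pvPassStep g) (d, flag) =
        ((adj.foldl (pvBStep g) (d, o)).1,
          (flag || decide ((adj.foldl (pvBStep g) (d, o)).2 ≠ o))) := by
  induction adj with
  | nil => intro d o flag; simp
  | cons n adj ih =>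
      intro d o flag
      simp only [List.foldl_cons]
      by_cases hc : d.contains n
      · have h1 : pvPassStep g (d, flag) n = (d, flag) := by simp [pvPassStep, hc]
        have h2 : pvBStep g (d, o) n = (d, o) := by simp [pvBStep, hc]
        simp only [h1, h2]
        exact ih d o flag
      · have hcf : d.contains n = false := Bool.not_eq_true _ ▸ hc
        have h1 : pvPassStep g (d, flag) n =
            (d.insert n ((PySem.Dict.mk g).getD n []), true) := by
          simp [pvPassStep, hcf]
        have h2 : pvBStep g (d, o) n =
            (d.insert n ((PySem.Dict.mk g).getD n []), o ++ [n]) := by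
          simp [pvBStep, hcf]
        simp only [h1, h2]
        rw [ih (d.insert n ((PySem.Dict.mk g).getD n [])) (o ++ [n]) true]
        obtain ⟨ext, hext⟩ : ∃ e, (adj.foldl (pvBStep g)
            (d.insert n ((PySem.Dict.mk g).getD n []), o ++ [n])).2 = (o ++ [n]) ++ e :=
          pvBStep_fold_prefix g adj _
        have hne : (adj.foldl (pvBStep g)
            (d.insert n ((PySem.Dict.mk g).getD n []), o ++ [n])).2 ≠ o := by
          rw [hext]
          intro hcontra
          have hlen := congrArg List.length hcontra
          simp only [List.length_append, List.length_cons, List.length_nil] at hlen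
          omega
        simp [hne]

-- a pass over a node list mirrors the corresponding segment of pvBStep folds
lemma pvC2 (g : List (String × List String)) (l : List String) :
    ∀ (r : PySem.Dict String (List String)) (o : List String) (flag : Bool),
      r.items = o.map (pvPair g) →
      l.foldl (pvPass g) (r, flag) =
        ((l.foldl (pvSeg g) (r, o)).1,
          (flag || decide ((l.foldl (pvSeg g) (r, o)).2 ≠ o))) := by
  induction l with
  | nil => intro r o flag h; simp
  | cons pkg l ih =>
      intro r o flag h
      simp only [List.foldl_cons]
      have hitems : (pvSeg g (r, o) pkg).1.items = (pvSeg g (r, o) pkg).2.map (pvPair g) :=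
        pvBStep_fold_items g ((PySem.Dict.mk g).getD pkg []) r o h
      have hpass : pvPass g (r, flag) pkg =
          ((pvSeg g (r, o) pkg).1, flag || decide ((pvSeg g (r, o) pkg).2 ≠ o)) :=
        pvC1 g ((PySem.Dict.mk g).getD pkg []) r o flag
      rw [hpass]
      have hrec := ih (pvSeg g (r, o) pkg).1 (pvSeg g (r, o) pkg).2
          (flag || decide ((pvSeg g (r, o) pkg).2 ≠ o)) hitems
      rw [hrec]
      simp only [Prod.mk.eta]
      obtain ⟨e1, he1⟩ : ∃ e, (pvSeg g (r, o) pkg).2 = o ++ e :=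
        pvBStep_fold_prefix g ((PySem.Dict.mk g).getD pkg []) (r, o)
      obtain ⟨e2, he2⟩ : ∃ e, (l.foldl (pvSeg g) (pvSeg g (r, o) pkg)).2 =
          (pvSeg g (r, o) pkg).2 ++ e :=
        pvSeg_fold_prefix g l (pvSeg g (r, o) pkg)
      by_cases h1 : (pvSeg g (r, o) pkg).2 = o
      · simp [h1]
      · have he1ne : e1 ≠ [] := by
          intro h0
          exact h1 (by rw [he1, h0, List.append_nil])
        have hne : (l.foldl (pvSeg g) (pvSeg g (r, o) pkg)).2 ≠ o := by
          rw [he2, he1]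
          intro hcontra
          have hlen := congrArg List.length hcontra
          simp only [List.length_append] at hlen
          have := List.length_pos_of_ne_nil he1ne
          omega
        simp [h1, hne]

-- a pass over already-closed packages changes nothing
lemma pvS0 (g : List (String × List String)) (adj : List String) :
    ∀ st : PySem.Dict String (List String) × Bool,
      (∀ d ∈ adj, st.1.contains d = true) → adj.foldl (pvPassStep g) st = st := by
  induction adj with
  | nil => intro st _; rfl
  | cons n adj ih =>
      intro st hall
      have h1 : pvPassStep g st n = st := by simp [pvPassStep, hall n (List.mem_cons_self ..)]
      simp only [List.foldl_cons, h1]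
      exact ih st (fun d hd => hall d (List.mem_cons_of_mem _ hd))

lemma pvS1 (g : List (String × List String)) (l : List String) :
    ∀ (r : PySem.Dict String (List String)) (o : List String) (flag : Bool),
      r.items = o.map (pvPair g) →
      (∀ x ∈ l, ∀ dep ∈ (PySem.Dict.mk g).getD x [], dep ∈ o) →
      l.foldl (pvPass g) (r, flag) = (r, flag) := by
  induction l with
  | nil => intro r o flag _ _; rfl
  | cons x l ih =>
      intro r o flag h hcl
      have hkeys : r.keys = o := pvKeys_of_items r g o h
      have h1 : pvPass g (r, flag) x = (r, flag) := by
        apply pvS0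
        intro d hd
        rw [PySem.Dict.contains_eq_decide_mem_keys, hkeys]
        simpa using hcl x (List.mem_cons_self ..) d hd
      simp only [List.foldl_cons, h1]
      exact ih r o flag h (fun y hy => hcl y (List.mem_cons_of_mem _ hy))

-- every dependency of a node processed by a pvBStep fold appears in the resulting order list
lemma pvC3a (g : List (String × List String)) (adj : List String) :
    ∀ (r : PySem.Dict String (List String)) (o : List String),
      r.keys = o → ∀ dep ∈ adj, dep ∈ (adj.foldl (pvBStep g) (r, o)).2 := by
  induction adj with
  | nil => intro r o _ dep hd; cases hd
  | cons n adj ih =>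
      intro r o hkeys dep hd
      simp only [List.foldl_cons]
      by_cases hc : r.contains n
      · have hst : pvBStep g (r, o) n = (r, o) := by simp [pvBStep, hc]
        rw [hst]
        rcases List.mem_cons.1 hd with rfl | hd'
        · have hmem : dep ∈ o := by
            rw [← hkeys]
            exact (PySem.Dict.contains_iff_mem_keys r dep).1 hc
          obtain ⟨ext, hext⟩ := pvBStep_fold_prefix g adj (r, o)
          rw [hext]
          exact List.mem_append.2 (Or.inl hmem)
        · exact ih r o hkeys dep hd'
      · have hcf : r.contains n = false := by
          cases h : r.contains n
          · rfl
          · exact absurd h hc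
        have hst : pvBStep g (r, o) n =
            (r.insert n ((PySem.Dict.mk g).getD n []), o ++ [n]) := by
          simp [pvBStep, hcf]
        rw [hst]
        have hkeys' : (r.insert n ((PySem.Dict.mk g).getD n [])).keys = o ++ [n] := by
          rw [PySem.Dict.keys_insert_of_not_contains _ _ hcf, hkeys]
        rcases List.mem_cons.1 hd with rfl | hd'
        · obtain ⟨ext, hext⟩ := pvBStep_fold_prefix g adj
            (r.insert dep ((PySem.Dict.mk g).getD dep []), o ++ [dep])
          rw [hext]
          exact List.mem_append.2 (Or.inl (List.mem_append.2 (Or.inr (List.mem_singleton.2 rfl))))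
        · exact ih _ _ hkeys' dep hd'

-- after a segment of pvBStep folds, every processed node is closed in the order list
lemma pvC3 (g : List (String × List String)) (l : List String) :
    ∀ (r : PySem.Dict String (List String)) (o : List String),
      r.items = o.map (pvPair g) →
      ∀ x ∈ l, ∀ dep ∈ (PySem.Dict.mk g).getD x [], dep ∈ (l.foldl (pvSeg g) (r, o)).2 := by
  induction l with
  | nil => intro r o _ x hx; cases hx
  | cons pkg l ih =>
      intro r o h x hx dep hdep
      simp only [List.foldl_cons]
      rcases hst : pvSeg g (r, o) pkg with ⟨r', o'⟩
      have hitems := pvBStep_fold_items g ((PySem.Dict.mk g).getD pkg []) r o h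
      rw [show ((PySem.Dict.mk g).getD pkg []).foldl (pvBStep g) (r, o) = (r', o') from hst]
        at hitems
      rcases List.mem_cons.1 hx with rfl | hx'
      · have hmem : dep ∈ o' := by
          have := pvC3a g ((PySem.Dict.mk g).getD x []) r o (pvKeys_of_items r g o h) dep hdep
          rw [show ((PySem.Dict.mk g).getD x []).foldl (pvBStep g) (r, o) = (r', o') from hst]
            at this
          exact this
        obtain ⟨ext, hext⟩ := pvSeg_fold_prefix g l (r', o')
        rw [hext]
        exact List.mem_append.2 (Or.inl hmem)
      · exact ih r' o' hitems x hx' dep hdep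

-- the index BFS run over a pending segment equals the segment fold, then continues
lemma pvE1 (g : List (String × List String)) (l : List String) :
    ∀ (r : PySem.Dict String (List String)) (o : List String) (i : Nat),
      r.items = o.map (pvPair g) →
      l <+: o.drop i →
      pvBLoop g r o i =
        pvBLoop g (l.foldl (pvSeg g) (r, o)).1 (l.foldl (pvSeg g) (r, o)).2 (i + l.length) := by
  induction l with
  | nil => intro r o i _ _; simp
  | cons pkg l ih =>
      intro r o i h hpre
      have hi : i < o.length := by
        by_contra hcon
        rw [List.drop_eq_nil_of_le (by omega)] at hpre
        simp [List.prefix_nil] at hpre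
      have hd : o.drop i = o[i] :: o.drop (i + 1) := (List.getElem_cons_drop hi).symm
      rw [hd] at hpre
      obtain ⟨hoi, hpre'⟩ := List.cons_prefix_cons.1 hpre
      rw [pvBLoop, dif_pos hi]
      have hgx : ((PySem.Dict.mk g).getD o[i] []) = ((PySem.Dict.mk g).getD pkg []) := by
        rw [← hoi]
      simp only [hgx]
      have hitems : (pvSeg g (r, o) pkg).1.items = (pvSeg g (r, o) pkg).2.map (pvPair g) :=
        pvBStep_fold_items g ((PySem.Dict.mk g).getD pkg []) r o h
      obtain ⟨ext, hext⟩ : ∃ e, (pvSeg g (r, o) pkg).2 = o ++ e :=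
        pvBStep_fold_prefix g ((PySem.Dict.mk g).getD pkg []) (r, o)
      have hpre'' : l <+: (pvSeg g (r, o) pkg).2.drop (i + 1) := by
        rw [hext, List.drop_append_of_le_length hi]
        exact hpre'.trans (List.prefix_append _ _)
      have hrec := ih (pvSeg g (r, o) pkg).1 (pvSeg g (r, o) pkg).2 (i + 1) hitems hpre''
      simp only [List.foldl_cons, List.length_cons]
      rw [show i + (l.length + 1) = (i + 1) + l.length from by omega]
      exact hrec

-- the index BFS equals B's fixpoint loop
lemma pvBridge (g : List (String × List String)) :
    ∀ (r : PySem.Dict String (List String)) (o : List String) (i : Nat),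
      r.items = o.map (pvPair g) →
      i ≤ o.length →
      (∀ x ∈ o.take i, ∀ dep ∈ (PySem.Dict.mk g).getD x [], dep ∈ o) →
      pvBLoop g r o i = pvBFix g r := by
  intro r
  fun_induction pvBFix g r with
  | case1 r st hflag ih =>
      intro o i h hi hcl
      have hkeys : r.keys = o := pvKeys_of_items r g o h
      have hpass : r.keys.foldl (pvPass g) (r, false) =
          (((o.drop i).foldl (pvSeg g) (r, o)).1,
            decide (((o.drop i).foldl (pvSeg g) (r, o)).2 ≠ o)) := by
        rw [hkeys]
        conv_lhs => rw [← List.take_append_drop i o]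
        rw [List.foldl_append,
          pvS1 g (o.take i) r o false h (fun x hx => hcl x hx)]
        simpa using pvC2 g (o.drop i) r o false h
      have hne : ((o.drop i).foldl (pvSeg g) (r, o)).2 ≠ o := by
        have h2 : (r.keys.foldl (pvPass g) (r, false)).2 = true := hflag
        rw [hpass] at h2
        simpa using h2
      have hst1 : st.1 = ((o.drop i).foldl (pvSeg g) (r, o)).1 := by
        have h1 : st.1 = (r.keys.foldl (pvPass g) (r, false)).1 := rfl
        rw [h1, hpass]
      have hQitems : ((o.drop i).foldl (pvSeg g) (r, o)).1.items =
          ((o.drop i).foldl (pvSeg g) (r, o)).2.map (pvPair g) :=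
        pvSeg_fold_items g (o.drop i) r o h
      obtain ⟨ext, hext⟩ : ∃ e, ((o.drop i).foldl (pvSeg g) (r, o)).2 = o ++ e :=
        pvSeg_fold_prefix g (o.drop i) (r, o)
      have hstep : pvBLoop g r o i =
          pvBLoop g ((o.drop i).foldl (pvSeg g) (r, o)).1
            ((o.drop i).foldl (pvSeg g) (r, o)).2 o.length := by
        have h3 := pvE1 g (o.drop i) r o i h (List.prefix_refl _)
        rwa [show i + (o.drop i).length = o.length from by simp; omega] at h3
      rw [hstep, hst1]
      have hQitems' : st.1.items = ((o.drop i).foldl (pvSeg g) (r, o)).2.map (pvPair g) := by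
        rw [hst1]; exact hQitems
      have hlen : o.length ≤ ((o.drop i).foldl (pvSeg g) (r, o)).2.length := by
        rw [hext]; simp
      have hclosed : ∀ x ∈ ((o.drop i).foldl (pvSeg g) (r, o)).2.take o.length,
          ∀ dep ∈ (PySem.Dict.mk g).getD x [],
            dep ∈ ((o.drop i).foldl (pvSeg g) (r, o)).2 := by
        intro x hx dep hdep
        have hxo : x ∈ o := by
          rw [hext, List.take_append_of_le_length (le_refl _), List.take_length] at hx
          exact hx
        rw [← List.take_append_drop i o] at hxo
        rcases List.mem_append.1 hxo with hx1 | hx2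
        · rw [hext]
          exact List.mem_append.2 (Or.inl (hcl x hx1 dep hdep))
        · exact pvC3 g (o.drop i) r o h x hx2 dep hdep
      have hfin := ih ((o.drop i).foldl (pvSeg g) (r, o)).2 o.length hQitems' hlen hclosed
      rw [hst1] at hfin
      exact hfin
  | case2 r st hflag =>
      intro o i h hi hcl
      have hkeys : r.keys = o := pvKeys_of_items r g o h
      have hpass : r.keys.foldl (pvPass g) (r, false) =
          (((o.drop i).foldl (pvSeg g) (r, o)).1,
            decide (((o.drop i).foldl (pvSeg g) (r, o)).2 ≠ o)) := by
        rw [hkeys]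
        conv_lhs => rw [← List.take_append_drop i o]
        rw [List.foldl_append,
          pvS1 g (o.take i) r o false h (fun x hx => hcl x hx)]
        simpa using pvC2 g (o.drop i) r o false h
      have heq : ((o.drop i).foldl (pvSeg g) (r, o)).2 = o := by
        have h2 : ¬ (r.keys.foldl (pvPass g) (r, false)).2 = true := hflag
        rw [hpass] at h2
        simpa using h2
      have hst1 : st.1 = ((o.drop i).foldl (pvSeg g) (r, o)).1 := by
        have h1 : st.1 = (r.keys.foldl (pvPass g) (r, false)).1 := rfl
        rw [h1, hpass]
      have hstep : pvBLoop g r o i =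
          pvBLoop g ((o.drop i).foldl (pvSeg g) (r, o)).1
            ((o.drop i).foldl (pvSeg g) (r, o)).2 o.length := by
        have h3 := pvE1 g (o.drop i) r o i h (List.prefix_refl _)
        rwa [show i + (o.drop i).length = o.length from by simp; omega] at h3
      rw [hstep, hst1, heq, pvBLoop, dif_neg (lt_irrefl o.length)]

-- ===== VERDICT (by name: the statement is the Claim_ definition above) =====
theorem buildDependentPackages_py_spec : Claim_equal_buildDependentPackages_py := by
  intro g package _ _
  unfold Spec_buildDependentPackages_py
  unfold buildDependentPackages_py buildDependentPackages_py_alt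
  cases package with
  | none => rfl
  | some p =>
      show (pvALoop g PySem.Dict.empty (PySem.Set.add PySem.Set.empty p)).items = _
      have hstart : PySem.Set.add PySem.Set.empty p = [p] := rfl
      rw [hstart]
      congr 1
      have hr0 : (PySem.Dict.empty.insert p ((PySem.Dict.mk g).getD p [])).items =
          [p].map (pvPair g) := by
        rw [PySem.Dict.items_insert_of_not_contains _ _ (by rfl)]
        simp [PySem.Dict.empty, pvPair]
      calc pvALoop g PySem.Dict.empty [p]
          = pvBLoop g (PySem.Dict.empty.insert p ((PySem.Dict.mk g).getD p [])) [p] 0 := by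
            apply pvMain
            · simp [PySem.Dict.empty]
            · exact hr0
            · exact List.nodup_singleton p
            · exact List.nodup_singleton p
            · intro x hx; exact hx
            · simp
        _ = pvBFix g (PySem.Dict.empty.insert p ((PySem.Dict.mk g).getD p [])) := by
            apply pvBridge g _ [p] 0 hr0 (by simp)
            simp
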